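-- pv_equiv track=rewrite | github.com/FacundoOZ/University-of-Buenos-Aires | MSc-in-Computer-Science/Algoritmos 1/guías/8_Integradora_Python.py | empleados_del_mes
-- ===== SOURCE A (Python) =====
-- def cant_horas(lista: list[int]) -> int:
--   res: int = 0                           # Creo una función que sume la cantidad de elementos de una lista
--   for i in lista:
--     res += i
--   return res
--
-- def empleados_del_mes(horas: dict[int,list[int]]) -> list[int]:
--   lista_horas: list[int] = []                                   # Genero una lista de horas totales
--   for clave in horas.keys():                                    # Agrego la cant_horas de cada empleado a la lista
--     lista_horas.append(cant_horas(horas[clave]))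
--   maximo: int = 0
--   for j in lista_horas:                                         # Busco el máximo de la lista
--     if j > maximo:
--       maximo = j
--   res: list[int] = []
--   for clave in horas.keys():                                    # Para cada clave de horas, si cant_horas de esa clave = máximo, agrego a res
--     if cant_horas(horas[clave]) == maximo:
--       res.append(clave)
--   return res
-- ===== SOURCE B (Python) =====
-- def empleados_del_mes(horas: dict[int, list[int]]) -> list[int]:
--     maximo: int = 0
--     res: list[int] = []
--     for clave, v in horas.items():
--         total = sum(v)
--         if total > maximo:
--             maximo = total
--             res = [clave]
--         elif total == maximo:
--             res.append(clave)
--     return res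
-- ===== Notes on version B (the rewrite author's own statement) =====
-- stated objective: simpler
-- what changed: Replaces A's three sequential passes (build a totals list, scan it for the max, re-walk the dict recomputing each total to filter) with a single running-best scan over horas.items() that keeps (maximo, res) and computes each total once.
import Mathlib
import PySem

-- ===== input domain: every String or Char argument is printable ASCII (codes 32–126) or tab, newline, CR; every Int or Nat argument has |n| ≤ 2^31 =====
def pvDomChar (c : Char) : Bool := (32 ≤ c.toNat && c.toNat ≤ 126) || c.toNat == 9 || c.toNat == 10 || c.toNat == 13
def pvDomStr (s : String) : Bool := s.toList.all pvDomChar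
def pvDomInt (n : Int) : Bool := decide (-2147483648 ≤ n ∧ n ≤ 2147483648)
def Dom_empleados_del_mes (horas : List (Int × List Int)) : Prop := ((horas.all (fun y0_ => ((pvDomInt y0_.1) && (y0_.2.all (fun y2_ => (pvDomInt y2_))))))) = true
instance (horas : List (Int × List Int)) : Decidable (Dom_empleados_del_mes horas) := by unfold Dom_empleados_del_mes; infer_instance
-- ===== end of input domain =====

-- B replaces A's three passes (totals list, max scan, re-filter with totals recomputed)
-- by one running-best pass over the items; return values proved equal on dicts (nodup keys).

-- ===== PORT A =====
def cant_horas (lista : List Int) : Int :=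
  lista.foldl (fun res i => res + i) 0

def empleados_del_mes (horas : List (Int × List Int)) : List Int :=
  let d := PySem.Dict.mk horas
  let lista_horas : List Int :=
    (PySem.Dict.keys d).foldl (fun acc clave => acc ++ [cant_horas (PySem.Dict.getD d clave [])]) []
  let maximo : Int := lista_horas.foldl (fun maximo j => if j > maximo then j else maximo) 0
  (PySem.Dict.keys d).foldl
    (fun res clave => if cant_horas (PySem.Dict.getD d clave []) = maximo then res ++ [clave] else res) []

-- ===== PORT B =====
def empleados_del_mes_alt (horas : List (Int × List Int)) : List Int :=
  (horas.foldl
    (fun (st : Int × List Int) p =>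
      let total := p.2.foldl (fun a x => a + x) 0
      if total > st.1 then (total, [p.1])
      else if total = st.1 then (st.1, st.2 ++ [p.1])
      else st)
    (0, [])).2

-- ===== PRECONDITION & SPEC =====
-- Pre_ excludes association lists with duplicate keys, which cannot arise from a Python dict
-- (A's lookup horas[clave] would use the first value for every duplicate, while B reads each pair).
def Pre_empleados_del_mes (horas : List (Int × List Int)) : Prop :=
  (horas.map Prod.fst).Nodup
instance (horas : List (Int × List Int)) : Decidable (Pre_empleados_del_mes horas) := by
  unfold Pre_empleados_del_mes; infer_instance

def pvWitness_empleados_del_mes : (List (Int × List Int)) := [(1, [3, 4]), (2, [7]), (3, [-1])]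

def Spec_empleados_del_mes (horas : List (Int × List Int)) (out : List Int) : Prop := out = empleados_del_mes_alt horas
instance (horas : List (Int × List Int)) (out : List Int) : Decidable (Spec_empleados_del_mes horas out) := by unfold Spec_empleados_del_mes; infer_instance

-- ===== CLAIM (what is proved, stated in full; the proofs are below) =====
def Claim_equal_empleados_del_mes : Prop := ∀ (horas : List (Int × List Int)), Dom_empleados_del_mes horas → Pre_empleados_del_mes horas → Spec_empleados_del_mes horas (empleados_del_mes horas)

-- ===== LEMMAS AND PROOFS =====

-- total of a pair
def pvTot (p : Int × List Int) : Int := p.2.foldl (fun a x => a + x) 0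

lemma cant_horas_eq (l : List Int) : cant_horas l = l.foldl (fun a x => a + x) 0 := rfl

lemma le_foldl_max (l : List Int) (m : Int) : m ≤ l.foldl max m := by
  induction l generalizing m with
  | nil => simp
  | cons a t ih => exact le_trans (le_max_left m a) (ih (max m a))

-- A's max loop is foldl max
lemma maxLoop_eq (l : List Int) (m : Int) :
    l.foldl (fun maximo j => if j > maximo then j else maximo) m = l.foldl max m := by
  induction l generalizing m with
  | nil => rfl
  | cons a t ih =>
      simp only [List.foldl_cons, ih]
      congr 1
      by_cases h : a ≤ m
      · simp [max_eq_left h, not_lt.mpr h]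
      · have h' : m < a := lt_of_not_ge h
        simp [max_eq_right h'.le, h']

-- characterization of B's single running-best pass
lemma foldB_eq (l : List (Int × List Int)) (m : Int) (r : List Int) :
    l.foldl
      (fun (st : Int × List Int) p =>
        let total := p.2.foldl (fun a x => a + x) 0
        if total > st.1 then (total, [p.1])
        else if total = st.1 then (st.1, st.2 ++ [p.1])
        else st) (m, r)
    = ((l.map pvTot).foldl max m,
       (if (l.map pvTot).foldl max m = m then r else [])
         ++ (l.filter (fun p => pvTot p = (l.map pvTot).foldl max m)).map Prod.fst) := by
  induction l generalizing m r with
  | nil => simp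
  | cons p t ih =>
      have hm : ∀ (mm : Int), mm ≤ (t.map pvTot).foldl max mm := fun mm => le_foldl_max _ mm
      simp only [List.foldl_cons, List.map_cons]
      by_cases h1 : pvTot p > m
      · rw [show (let total := p.2.foldl (fun a x => a + x) 0
            if total > m then (total, [p.1])
            else if total = m then (m, r ++ [p.1])
            else ((m, r) : Int × List Int)) = ((pvTot p), [p.1]) by
              simp only [pvTot] at h1 ⊢; simp [h1]]
        rw [ih]
        have hmx : max m (pvTot p) = pvTot p := max_eq_right h1.le
        simp only [hmx]
        have hne : (t.map pvTot).foldl max (pvTot p) ≠ m := by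
          have := hm (pvTot p); omega
        simp only [hne, if_false, List.filter_cons, List.nil_append]
        by_cases h2 : pvTot p = (t.map pvTot).foldl max (pvTot p)
        · have e : (t.map pvTot).foldl max (pvTot p) = pvTot p := h2.symm
          simp [e]
        · have h2' : ¬ (t.map pvTot).foldl max (pvTot p) = pvTot p := fun h => h2 h.symm
          simp [h2, h2']
      · by_cases h2 : pvTot p = m
        · rw [show (let total := p.2.foldl (fun a x => a + x) 0
              if total > m then (total, [p.1])
              else if total = m then (m, r ++ [p.1])
              else ((m, r) : Int × List Int)) = (m, r ++ [p.1]) by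
                simp only [pvTot] at h1 h2 ⊢; simp [h2]]
          rw [ih]
          have hmx : max m (pvTot p) = m := by omega
          simp only [hmx]
          by_cases h3 : (t.map pvTot).foldl max m = m
          · simp [h3, h2]
          · have : ¬ pvTot p = (t.map pvTot).foldl max m := by rw [h2]; exact fun h => h3 h.symm
            simp [h3, this]
        · rw [show (let total := p.2.foldl (fun a x => a + x) 0
              if total > m then (total, [p.1])
              else if total = m then (m, r ++ [p.1])
              else ((m, r) : Int × List Int)) = (m, r) by
                simp only [pvTot] at h1 h2 ⊢; simp [h1, h2]]
          rw [ih]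
          have hmx : max m (pvTot p) = m := by omega
          simp only [hmx]
          have : ¬ pvTot p = (t.map pvTot).foldl max m := by
            have := hm m; intro h; omega
          simp [this]

-- with nodup keys, A's per-key lookup recovers the pair values
lemma getD_mk_of_mem {horas : List (Int × List Int)} (hnd : (horas.map Prod.fst).Nodup)
    {p : Int × List Int} (hp : p ∈ horas) :
    PySem.Dict.getD (PySem.Dict.mk horas) p.1 [] = p.2 :=
  PySem.Dict.getD_of_mem_items (d := PySem.Dict.mk horas) (k := p.1) (v := p.2) hp hnd []

-- A's filter loop over keys, with a lookup agreeing with pvTot pairwise, filters the pairs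
lemma filterLoop_eq (l : List (Int × List Int)) (g : Int → Int) (M : Int) (acc : List Int)
    (hg : ∀ p ∈ l, g p.1 = pvTot p) :
    (l.map Prod.fst).foldl (fun res k => if g k = M then res ++ [k] else res) acc
    = acc ++ (l.filter (fun p => pvTot p = M)).map Prod.fst := by
  induction l generalizing acc with
  | nil => simp
  | cons p t ih =>
      simp only [List.map_cons, List.foldl_cons, List.filter_cons]
      rw [hg p (by simp)]
      by_cases h : pvTot p = M
      · rw [if_pos h, ih _ (fun q hq => hg q (by simp [hq]))]
        simp [h]
      · rw [if_neg h, ih _ (fun q hq => hg q (by simp [hq]))]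
        simp [h]

-- ===== VERDICT (by name: the statement is the Claim_ definition above) =====
theorem empleados_del_mes_spec : Claim_equal_empleados_del_mes := by
  intro horas _ hpre
  show empleados_del_mes horas = empleados_del_mes_alt horas
  unfold empleados_del_mes empleados_del_mes_alt
  rw [foldB_eq]
  have hkeys : PySem.Dict.keys (PySem.Dict.mk horas) = horas.map Prod.fst := rfl
  simp only [hkeys]
  have hg : ∀ p ∈ horas, cant_horas (PySem.Dict.getD (PySem.Dict.mk horas) p.1 []) = pvTot p := by
    intro p hp
    rw [getD_mk_of_mem hpre hp, cant_horas_eq]; rfl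
  have hlista :
      (horas.map Prod.fst).foldl
        (fun acc clave => acc ++ [cant_horas (PySem.Dict.getD (PySem.Dict.mk horas) clave [])]) []
      = horas.map pvTot := by
    rw [PySem.List.foldl_append_singleton_eq_map, List.map_map, List.nil_append]
    exact List.map_congr_left (fun p hp => hg p hp)
  rw [hlista, maxLoop_eq]
  rw [filterLoop_eq horas _ _ [] hg]
  simp
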